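-- pv_equiv track=rewrite | github.com/KarolinaPSouza/dataset-pesquisa | 1091-Concert_Tickets/11597979.py | impl1
-- ===== SOURCE A (Python) =====
-- def impl1(prices,line):
--     prices = prices[:]
--     lis = []
--     for L in line:
--         for i in range(len(prices)):
--             if prices[-1] <= L or (i > 0 and prices[i-1] <= L and prices[i] > L):
--                 lis.append(prices[i-1])
--                 del prices[i-1]
--                 break
--         else:
--             lis.append(-1)
--     return lis
-- ===== SOURCE B (Python) =====
-- def impl1(prices, line):
--     # Staged reformulation: per query build the boolean threshold mask [x > L],
--     # then locate the removed slot by two first-index searches on the mask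
--     # (first False = first element <= L, then first True after it), instead of
--     # A's single index loop over three-way adjacent-pair conditions.
--     rem = list(prices)
--     out = []
--     for L in line:
--         mask = [x > L for x in rem]
--         if not mask:
--             out.append(-1)
--         elif not mask[-1]:
--             out.append(rem.pop())
--         elif False in mask:
--             f = mask.index(False)
--             g = f + mask[f:].index(True)
--             out.append(rem.pop(g - 1))
--         else:
--             out.append(-1)
--     return out
-- ===== Notes on version B (the rewrite author's own statement) =====
-- stated objective: alternative
-- what changed: A's per-query index loop with a three-way condition (prices[-1] wraparound or an adjacent pair prices[i-1] <= L < prices[i]) is replaced by staged passes: build the boolean mask [x > L], then find the removed slot with two list.index searches (first False, then first True after it); no adjacent-pair comparison or for/else remains.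
import Mathlib
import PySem

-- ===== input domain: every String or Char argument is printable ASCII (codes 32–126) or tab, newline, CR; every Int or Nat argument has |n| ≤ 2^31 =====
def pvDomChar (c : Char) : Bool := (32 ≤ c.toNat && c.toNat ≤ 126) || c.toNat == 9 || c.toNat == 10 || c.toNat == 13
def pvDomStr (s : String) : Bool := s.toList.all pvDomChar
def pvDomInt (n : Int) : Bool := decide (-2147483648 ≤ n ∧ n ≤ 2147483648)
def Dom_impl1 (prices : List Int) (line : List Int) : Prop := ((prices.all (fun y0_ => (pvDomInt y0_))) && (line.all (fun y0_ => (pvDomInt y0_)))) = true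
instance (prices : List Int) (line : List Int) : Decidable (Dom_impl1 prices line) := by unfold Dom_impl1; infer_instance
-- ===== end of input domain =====

-- B replaces A's index loop with its three-way condition (prices[-1] wraparound or an
-- adjacent pair prices[i-1] <= L < prices[i]) by staged passes per query: build the
-- boolean mask [x > L], then locate the removed slot with two first-index searches
-- (first False, then first True after it). Objective: alternative; same return value.

-- ===== PORT A =====
-- inner `for i in range(len(prices))` with break/else; `prices[-1]` / `del prices[i-1]`
-- are in range whenever the loop body runs (len > 0), so getD/eraseIdx are exact here.
def implA_pick (prices : List Int) (L : Int) (i : Nat) : Int × List Int :=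
  if _h : i < prices.length then
    if prices.getD (prices.length - 1) 0 ≤ L ∨
        (0 < i ∧ prices.getD (i - 1) 0 ≤ L ∧ L < prices.getD i 0) then
      -- python index i-1: the last slot when i = 0, else slot i-1
      let j := if i = 0 then prices.length - 1 else i - 1
      (prices.getD j 0, prices.eraseIdx j)
    else implA_pick prices L (i + 1)
  else (-1, prices)   -- for/else: no break ⇒ append -1
termination_by prices.length - i

def impl1 (prices : List Int) (line : List Int) : List Int :=
  (line.foldl (fun (st : List Int × List Int) L =>
      let r := implA_pick st.1 L 0
      (r.2, st.2 ++ [r.1])) (prices, ([] : List Int))).2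

-- ===== PORT B =====
-- one query of Source B: mask = [x > L for x in rem]; three mask-driven cases
def implB_take (rem : List Int) (L : Int) : Int × List Int :=
  let mask := rem.map (fun x => decide (L < x))
  if mask = [] then (-1, rem)
  else if mask.getLastD true = false then
    -- rem.pop(): rem is nonempty here, so getLastD/dropLast are exact
    (rem.getLastD 0, rem.dropLast)
  else
    match PySem.List.index? mask false with
    | none => (-1, rem)
    | some f =>
      match PySem.List.index? (mask.drop f) true with
      | some d =>
          -- rem.pop(g-1) with g = f + d; g-1 is in range here, so getD/eraseIdx are exact
          (rem.getD (f + d - 1) 0, rem.eraseIdx (f + d - 1))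
      | none => (-1, rem)  -- unreachable in Source B: mask's last entry is True in this branch

def implB_go : List Int → List Int → List Int
  | _, [] => []
  | rem, L :: ls => let r := implB_take rem L; r.1 :: implB_go r.2 ls

def impl1_alt (prices : List Int) (line : List Int) : List Int :=
  implB_go prices line

-- ===== PRECONDITION & SPEC =====
def Spec_impl1 (prices : List Int) (line : List Int) (out : List Int) : Prop := out = impl1_alt prices line
instance (prices : List Int) (line : List Int) (out : List Int) : Decidable (Spec_impl1 prices line out) := by unfold Spec_impl1; infer_instance

-- ===== CLAIM (what is proved, stated in full; the proofs are below) =====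
def Claim_equal_impl1 : Prop := ∀ (prices : List Int) (line : List Int), Dom_impl1 prices line → Spec_impl1 prices line (impl1 prices line)

-- ===== LEMMAS AND PROOFS =====

-- proof-side bridge: the first adjacent pair a ≤ L < b, as a scan (matches A's inner loop)
def implB_pairs : List Int → Int → Nat → Option Nat
  | a :: b :: rest, L, j =>
      if a ≤ L ∧ L < b then some j else implB_pairs (b :: rest) L (j + 1)
  | _, _, _ => none

-- proof-side bridge: the same scan on the boolean mask
def pairsTF : List Bool → Option Nat
  | a :: b :: t => if a = false ∧ b = true then some 0 else (pairsTF (b :: t)).map (· + 1)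
  | _ => none

theorem implB_pairs_one (x : Int) (L : Int) (j : Nat) : implB_pairs [x] L j = none := rfl

-- A's loop from i ≥ 1, when the last element is > L, is the adjacent-pair scan
theorem implA_loop_eq (p : List Int) (L : Int) (i : Nat) (h1 : 1 ≤ i)
    (h2 : i ≤ p.length) (hlast : ¬ p.getD (p.length - 1) 0 ≤ L) :
    implA_pick p L i =
      (match implB_pairs (p.drop (i - 1)) L (i - 1) with
        | some j => (p.getD j 0, p.eraseIdx j)
        | none => (-1, p)) := by
  induction hk : p.length - i using Nat.strong_induction_on generalizing i with
  | _ k ih =>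
    by_cases h : i < p.length
    · have hi1 : i - 1 < p.length := by omega
      have hdrop : p.drop (i - 1) = p[i - 1] :: p[i] :: p.drop (i + 1) := by
        rw [List.drop_eq_getElem_cons hi1]
        have : i - 1 + 1 = i := by omega
        rw [this, List.drop_eq_getElem_cons h]
      rw [implA_pick]
      simp only [h, dif_pos]
      by_cases hc : p.getD (i - 1) 0 ≤ L ∧ L < p.getD i 0
      · have hcond : p.getD (p.length - 1) 0 ≤ L ∨
            (0 < i ∧ p.getD (i - 1) 0 ≤ L ∧ L < p.getD i 0) := by
          right; exact ⟨by omega, hc⟩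
        rw [if_pos hcond, hdrop, implB_pairs]
        have hne : i ≠ 0 := by omega
        rw [List.getD_eq_getElem p 0 hi1, List.getD_eq_getElem p 0 h] at hc
        rw [if_pos hc]
        simp [hne]
      · have hcond : ¬ (p.getD (p.length - 1) 0 ≤ L ∨
            (0 < i ∧ p.getD (i - 1) 0 ≤ L ∧ L < p.getD i 0)) := by
          rintro (h' | ⟨-, h1', h2'⟩)
          · exact hlast h'
          · exact hc ⟨h1', h2'⟩
        rw [if_neg hcond]
        have := ih (p.length - (i + 1)) (by omega) (i + 1) (by omega) (by omega) rfl
        rw [this, hdrop, implB_pairs]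
        rw [List.getD_eq_getElem p 0 hi1, List.getD_eq_getElem p 0 h] at hc
        rw [if_neg hc]
        have hdr : p.drop i = p[i] :: p.drop (i + 1) := List.drop_eq_getElem_cons h
        have hi11 : i - 1 + 1 = i := by omega
        simp only [Nat.add_sub_cancel, hdr, hi11]
    · have hi : i = p.length := by omega
      rw [implA_pick]
      simp only [h, dif_neg, not_false_iff]
      have hi1 : i - 1 < p.length := by omega
      have hdrop : p.drop (i - 1) = [p[i - 1]] := by
        rw [List.drop_eq_getElem_cons hi1]
        have : i - 1 + 1 = p.length := by omega
        rw [this, List.drop_length]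
      rw [hdrop, implB_pairs_one]

-- the int-level scan equals the mask-level scan
theorem pairs_eq_pairsTF (p : List Int) (L : Int) (j : Nat) :
    implB_pairs p L j = (pairsTF (p.map (fun x => decide (L < x)))).map (· + j) := by
  induction p generalizing j with
  | nil => simp [implB_pairs, pairsTF]
  | cons a t ih =>
    cases t with
    | nil => simp [implB_pairs, pairsTF]
    | cons b t' =>
      rw [implB_pairs]
      simp only [List.map_cons]
      rw [pairsTF]
      by_cases hc : a ≤ L ∧ L < b
      · rw [if_pos hc, if_pos (by simpa [decide_eq_true_iff, not_lt] using hc)]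
        simp
      · rw [if_neg hc, if_neg (by
          intro ⟨h1, h2⟩
          exact hc ⟨by simpa [not_lt] using h1, by simpa using h2⟩)]
        rw [ih (j + 1)]
        simp only [List.map_cons, Option.map_map]
        congr 1
        funext x
        simp
        omega

-- mask-level scan = two first-index searches, when the last mask entry is not False
theorem pairsTF_eq_index (m : List Bool) (hl : m.getLast? ≠ some false) :
    pairsTF m = (PySem.List.index? m false).bind
      (fun f => (PySem.List.index? (m.drop (f + 1)) true).map (fun d => f + d)) := by
  induction m with
  | nil => simp [pairsTF]
  | cons a t ih =>
    cases t with
    | nil =>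
      cases a
      · simp at hl
      · decide
    | cons b t' =>
      have hl' : (b :: t').getLast? ≠ some false := by
        simpa [List.getLast?_cons_cons] using hl
      rw [pairsTF]
      cases a with
      | true =>
        rw [if_neg (by simp)]
        rw [PySem.List.index?_cons_of_ne _ (by simp)]
        rw [ih hl']
        cases hf : PySem.List.index? (b :: t') false with
        | none => simp
        | some f =>
          simp only [Option.map_some, Option.bind_some]
          have : (true :: b :: t').drop (f + 1 + 1) = (b :: t').drop (f + 1) := rfl
          rw [this]
          cases PySem.List.index? ((b :: t').drop (f + 1)) true with
          | none => simp
          | some d => simp; omega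
      | false =>
        rw [PySem.List.index?_cons_self]
        simp only [Option.bind_some, List.drop_succ_cons, List.drop_zero]
        cases b with
        | true =>
          rw [if_pos (by simp), PySem.List.index?_cons_self]
          simp
        | false =>
          rw [if_neg (by simp)]
          rw [ih hl']
          rw [PySem.List.index?_cons_self]
          simp only [Option.bind_some, List.drop_succ_cons, List.drop_zero]
          rw [PySem.List.index?_cons_of_ne _ (by simp)]
          cases PySem.List.index? t' true with
          | none => simp
          | some d => simp
-- ===== one query: A's scan equals B's mask-driven take =====
theorem implA_pick_eq_take (p : List Int) (L : Int) :
    implA_pick p L 0 = implB_take p L := by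
  rcases p with _ | ⟨a, t⟩
  · rw [implA_pick]; simp [implB_take]
  · set p := a :: t with hp
    have hne : p ≠ [] := by simp [hp]
    have hlen : 0 < p.length := by simp [hp]
    set mask := p.map (fun x => decide (L < x)) with hmask
    have hmne : mask ≠ [] := by simp [hmask, hp]
    have hml : mask.getLast? = some (decide (L < p.getD (p.length - 1) 0)) := by
      rw [hmask, List.getLast?_map, List.getLast?_eq_getElem? ,
        List.getElem?_eq_getElem (by omega), List.getD_eq_getElem p 0 (by omega)]
      simp
    have hmlD : mask.getLastD true = decide (L < p.getD (p.length - 1) 0) := by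
      rw [List.getLastD_eq_getLast?, hml, Option.getD_some]
    by_cases hL : p.getD (p.length - 1) 0 ≤ L
    · -- last element ≤ L: both pop the last slot
      rw [implA_pick]
      have hcond : p.getD (p.length - 1) 0 ≤ L ∨
          (0 < 0 ∧ p.getD (0 - 1) 0 ≤ L ∧ L < p.getD 0 0) := Or.inl hL
      simp only [hlen, dif_pos, hcond, if_pos]
      rw [implB_take]
      simp only [← hmask, if_neg hmne]
      rw [hmlD, if_pos (by simpa [not_lt] using hL)]
      have h1 : p.eraseIdx (p.length - 1) = p.dropLast :=
        (List.dropLast_eq_eraseIdx (by omega)).symm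
      have h2 : p.getD (p.length - 1) 0 = p.getLastD 0 := by
        rw [List.getD_eq_getElem p 0 (by omega), List.getLastD_eq_getLast?,
          List.getLast?_eq_getElem?, List.getElem?_eq_getElem (by omega)]
        rfl
      rw [h1, h2]
    · -- last element > L: A's inner scan; B's two index searches
      rw [implA_pick]
      have hcond : ¬ (p.getD (p.length - 1) 0 ≤ L ∨
          (0 < 0 ∧ p.getD (0 - 1) 0 ≤ L ∧ L < p.getD 0 0)) := by
        rintro (h' | ⟨h0, -⟩)
        · exact hL h'
        · omega
      simp only [hlen, dif_pos, hcond, if_neg, not_false_iff]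
      rw [implA_loop_eq p L 1 le_rfl (by omega) hL]
      simp only [Nat.sub_self, List.drop_zero]
      rw [implB_take]
      simp only [← hmask, if_neg hmne]
      rw [hmlD, if_neg (by simpa [not_lt] using hL)]
      have hnotfalse : mask.getLast? ≠ some false := by
        rw [hml]; simpa [not_lt] using hL
      rw [pairs_eq_pairsTF p L 0, pairsTF_eq_index mask hnotfalse]
      cases hf : PySem.List.index? mask false with
      | none => simp
      | some f =>
        -- mask[f] = false, so mask.drop f = false :: mask.drop (f+1)
        obtain ⟨hfl, hfv, -⟩ := PySem.List.getElem_of_index?_eq_some hf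
        have hdropf : mask.drop f = false :: mask.drop (f + 1) := by
          rw [List.drop_eq_getElem_cons hfl, hfv]
        simp only [Option.bind_some, hdropf, PySem.List.index?_cons_of_ne _ (by simp : (false : Bool) ≠ true)]
        cases PySem.List.index? (mask.drop (f + 1)) true with
        | none => simp
        | some d => simp

-- the foldl accumulator of A's outer loop produces B's cons recursion
theorem impl1_fold_eq (line : List Int) : ∀ (rem acc : List Int),
    (line.foldl (fun (st : List Int × List Int) L =>
        ((implA_pick st.1 L 0).2, st.2 ++ [(implA_pick st.1 L 0).1])) (rem, acc)).2
      = acc ++ implB_go rem line := by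
  induction line with
  | nil => intro rem acc; simp [implB_go]
  | cons L ls ih =>
    intro rem acc
    simp only [List.foldl_cons]
    rw [ih]
    simp [implA_pick_eq_take, implB_go]

-- ===== VERDICT (by name: the statement is the Claim_ definition above) =====
theorem impl1_spec : Claim_equal_impl1 := by
  intro prices line _
  unfold Spec_impl1 impl1 impl1_alt
  simpa using impl1_fold_eq line prices []
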